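-- pv_equiv track=rewrite | github.com/adamyedidia/lux | src/python3_files/tracker_shitty.py | findGreatestContiguousNonWhite
-- ===== SOURCE A (Python) =====
-- def isWhite(rgb):
--     if rgb[0] == 255:
--         if rgb[1] == 255:
--             if rgb[2] == 255:
--                 return True
--
--     return False
--
-- def findGreatestContiguousNonWhite(row):
--     widthOfContig = 0
--     widestContig = 0
--     startIndex = None
--     widestContigStartIndex = None
--
--     for i, color in enumerate(row):
--         if isWhite(color):
--             widthOfContig = 0
--             startIndex = None
--         else:
--             if startIndex == None:
--                 startIndex = i
--
--             widthOfContig += 1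
--             if widthOfContig > widestContig:
--                 widestContig = widthOfContig
--                 widestContigStartIndex = startIndex
--
--     return widestContigStartIndex, widestContig
-- ===== SOURCE B (Python) =====
-- from itertools import groupby
--
-- def isWhite(rgb):
--     if rgb[0] == 255:
--         if rgb[1] == 255:
--             if rgb[2] == 255:
--                 return True
--
--     return False
--
-- def findGreatestContiguousNonWhite(row):
--     runs = [(next(g)[0], 1 + sum(1 for _ in g))
--             for white, g in groupby(enumerate(row), key=lambda p: isWhite(p[1]))
--             if not white]
--     return max(runs, key=lambda r: r[1], default=(None, 0))
-- ===== Notes on version B (the rewrite author's own statement) =====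
-- stated objective: alternative
-- what changed: Replaces A's single stateful scan (four running variables tracking current/widest run) by materializing all non-white runs as (start, length) pairs via itertools.groupby and then taking max by length with default (None, 0); first-max tie-breaking matches A's first-widest rule.
import Mathlib
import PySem

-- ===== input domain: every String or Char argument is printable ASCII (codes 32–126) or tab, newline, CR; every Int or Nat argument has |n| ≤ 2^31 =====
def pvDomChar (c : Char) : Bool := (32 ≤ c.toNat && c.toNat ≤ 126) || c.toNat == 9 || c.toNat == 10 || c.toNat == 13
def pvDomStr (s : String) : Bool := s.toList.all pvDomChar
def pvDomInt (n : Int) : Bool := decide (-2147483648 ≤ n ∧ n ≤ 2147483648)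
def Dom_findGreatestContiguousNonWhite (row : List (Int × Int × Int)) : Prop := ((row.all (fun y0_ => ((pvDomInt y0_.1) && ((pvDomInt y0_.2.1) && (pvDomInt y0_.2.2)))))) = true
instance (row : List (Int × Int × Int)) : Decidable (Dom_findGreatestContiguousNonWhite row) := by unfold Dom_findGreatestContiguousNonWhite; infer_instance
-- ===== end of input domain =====

-- B materializes all non-white runs as (start, length) pairs and takes the first max by
-- length, instead of A's single stateful scan; same O(n) cost, alternative decomposition.

-- ===== PORT A =====
def pvIsWhite (rgb : Int × Int × Int) : Bool :=
  if rgb.1 = 255 then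
    if rgb.2.1 = 255 then
      if rgb.2.2 = 255 then true
      else false
    else false
  else false

-- the for-loop over enumerate(row), carrying i and (widthOfContig, widestContig, startIndex, widestContigStartIndex)
def pvLoopA : List (Int × Int × Int) → Int → Int × Int × Option Int × Option Int → Int × Int × Option Int × Option Int
  | [], _, s => s
  | color :: rest, i, (w, best, st, bs) =>
    if pvIsWhite color then pvLoopA rest (i + 1) (0, best, none, bs)
    else
      let start := st.getD i
      let w' := w + 1
      if w' > best then pvLoopA rest (i + 1) (w', w', some start, some start)
      else pvLoopA rest (i + 1) (w', best, some start, bs)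

def findGreatestContiguousNonWhite (row : List (Int × Int × Int)) : Option Int × Int :=
  let s := pvLoopA row 0 (0, 0, none, none)
  (s.2.2.2, s.2.1)

-- ===== PORT B =====
-- groupby(enumerate(row), key=isWhite∘snd), ported by hand: pvTakeRun measures one maximal
-- non-white group (next(g)[0] / sum over the group), pvRuns collects the non-white groups
-- as (start index, length) pairs.
def pvTakeRun : List (Int × Int × Int) → Int × List (Int × Int × Int)
  | [] => (0, [])
  | c :: rest =>
    if pvIsWhite c then (0, c :: rest)
    else ((pvTakeRun rest).1 + 1, (pvTakeRun rest).2)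

theorem pvTakeRun_len : ∀ (l : List (Int × Int × Int)), (pvTakeRun l).2.length ≤ l.length := by
  intro l
  induction l with
  | nil => simp [pvTakeRun]
  | cons c rest ih =>
    by_cases hc : pvIsWhite c = true <;> simp [pvTakeRun, hc] <;> omega

def pvRuns : List (Int × Int × Int) → Int → List (Int × Int)
  | [], _ => []
  | c :: rest, i =>
    if pvIsWhite c then pvRuns rest (i + 1)
    else (i, 1 + (pvTakeRun rest).1) :: pvRuns (pvTakeRun rest).2 (i + 1 + (pvTakeRun rest).1)
termination_by l _ => l.length
decreasing_by
  · simp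
  · exact Nat.lt_succ_of_le (pvTakeRun_len rest)

-- max(runs, key=lambda r: r[1], default=(None, 0)): first element with maximal key
def pvMaxRun : List (Int × Int) → Option Int × Int
  | [] => (none, 0)
  | r :: rs =>
    let b := rs.foldl (fun b r => if r.2 > b.2 then r else b) r
    (some b.1, b.2)

def findGreatestContiguousNonWhite_alt (row : List (Int × Int × Int)) : Option Int × Int :=
  pvMaxRun (pvRuns row 0)

-- ===== PRECONDITION & SPEC =====
def Spec_findGreatestContiguousNonWhite (row : List (Int × Int × Int)) (out : Option Int × Int) : Prop := out = findGreatestContiguousNonWhite_alt row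
instance (row : List (Int × Int × Int)) (out : Option Int × Int) : Decidable (Spec_findGreatestContiguousNonWhite row out) := by unfold Spec_findGreatestContiguousNonWhite; infer_instance

-- ===== CLAIM (what is proved, stated in full; the proofs are below) =====
def Claim_equal_findGreatestContiguousNonWhite : Prop := ∀ (row : List (Int × Int × Int)), Dom_findGreatestContiguousNonWhite row → Spec_findGreatestContiguousNonWhite row (findGreatestContiguousNonWhite row)

-- ===== LEMMAS AND PROOFS =====

theorem pvTakeRun_nonneg : ∀ (l : List (Int × Int × Int)), 0 ≤ (pvTakeRun l).1 := by
  intro l; induction l with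
  | nil => simp [pvTakeRun]
  | cons c rest ih => simp only [pvTakeRun]; split <;> omega

-- after a maximal non-white group the remainder is empty or starts white
def pvHeadWhite : List (Int × Int × Int) → Prop
  | [] => True
  | c :: _ => pvIsWhite c = true

theorem pvTakeRun_head : ∀ (l : List (Int × Int × Int)), pvHeadWhite (pvTakeRun l).2 := by
  intro l; induction l with
  | nil => simp [pvTakeRun, pvHeadWhite]
  | cons c rest ih =>
    simp only [pvTakeRun]
    split
    · simpa [pvHeadWhite] using ‹pvIsWhite c = true›
    · exact ih

-- A's loop across one maximal non-white group, from a mid-run state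
theorem pvLoopA_run : ∀ (l : List (Int × Int × Int)) (i w best start : Int) (bs : Option Int),
    w ≤ best →
    pvLoopA l i (w, best, some start, bs)
      = pvLoopA (pvTakeRun l).2 (i + (pvTakeRun l).1)
          (w + (pvTakeRun l).1, max best (w + (pvTakeRun l).1), some start,
           if w + (pvTakeRun l).1 > best then some start else bs) := by
  intro l
  induction l with
  | nil =>
    intro i w best start bs hwb
    simp only [pvTakeRun, pvLoopA, add_zero]
    rw [max_eq_left hwb, if_neg (by omega : ¬ (w > best))]
  | cons c rest ih =>
    intro i w best start bs hwb
    by_cases hc : pvIsWhite c = true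
    · have h1 : pvTakeRun (c :: rest) = (0, c :: rest) := by simp [pvTakeRun, hc]
      rw [h1]
      simp only [add_zero]
      rw [max_eq_left hwb, if_neg (by omega : ¬ (w > best))]
    · have h1 : pvTakeRun (c :: rest)
          = ((pvTakeRun rest).1 + 1, (pvTakeRun rest).2) := by
        simp [pvTakeRun, hc]
      have hm := pvTakeRun_nonneg rest
      set m := (pvTakeRun rest).1 with hmdef
      have hstep : pvLoopA (c :: rest) i (w, best, some start, bs)
          = pvLoopA rest (i + 1)
              (w + 1, if w + 1 > best then w + 1 else best, some start,
               if w + 1 > best then some start else bs) := by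
        simp only [pvLoopA, hc, Bool.false_eq_true, ite_false, Option.getD_some]
        split <;> rfl
      rw [hstep]
      rw [ih (i + 1) (w + 1) (if w + 1 > best then w + 1 else best) start
            (if w + 1 > best then some start else bs) (by split <;> omega)]
      rw [h1]
      simp only
      congr 1
      · omega
      · simp only [Prod.mk.injEq]
        and_intros <;> first | rfl | trivial | (split_ifs <;> first | rfl | omega) | omega

-- when the list starts white (or is empty), widthOfContig / startIndex do not matter for the result
theorem pvLoopA_reset (l : List (Int × Int × Int)) (i w best : Int) (st bs : Option Int)
    (h : pvHeadWhite l) :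
    ((pvLoopA l i (w, best, st, bs)).2.2.2, (pvLoopA l i (w, best, st, bs)).2.1)
      = ((pvLoopA l i (0, best, none, bs)).2.2.2, (pvLoopA l i (0, best, none, bs)).2.1) := by
  cases l with
  | nil => simp [pvLoopA]
  | cons c rest =>
    have hc : pvIsWhite c = true := h
    simp [pvLoopA, hc]

-- the fold B's max performs, in A's (best, bestStart) orientation
def pvUpd (p : Int × Option Int) (r : Int × Int) : Int × Option Int :=
  if r.2 > p.1 then (r.2, some r.1) else p

-- main invariant: A's scan from a fresh-run state equals folding pvUpd over the runs of the suffix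
theorem pvMain : ∀ (n : Nat) (l : List (Int × Int × Int)) (i best : Int) (bs : Option Int),
    l.length ≤ n → 0 ≤ best →
    ((pvLoopA l i (0, best, none, bs)).2.2.2, (pvLoopA l i (0, best, none, bs)).2.1)
      = (((pvRuns l i).foldl pvUpd (best, bs)).2, ((pvRuns l i).foldl pvUpd (best, bs)).1) := by
  intro n
  induction n with
  | zero =>
    intro l i best bs hlen _
    have : l = [] := List.eq_nil_of_length_eq_zero (Nat.le_zero.mp hlen)
    subst this
    simp [pvLoopA, pvRuns]
  | succ n ih =>
    intro l i best bs hlen hb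
    cases l with
    | nil => simp [pvLoopA, pvRuns]
    | cons c rest =>
      by_cases hc : pvIsWhite c = true
      · have h1 : pvLoopA (c :: rest) i (0, best, none, bs)
            = pvLoopA rest (i + 1) (0, best, none, bs) := by simp [pvLoopA, hc]
        have h2 : pvRuns (c :: rest) i = pvRuns rest (i + 1) := by
          rw [pvRuns]; simp [hc]
        rw [h1, h2]
        exact ih rest (i + 1) best bs (by simpa using Nat.le_of_succ_le_succ hlen) hb
      · have hm := pvTakeRun_nonneg rest
        set m := (pvTakeRun rest).1 with hmdef
        set rest' := (pvTakeRun rest).2 with hrdef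
        have hstep : pvLoopA (c :: rest) i (0, best, none, bs)
            = pvLoopA rest (i + 1)
                (1, if 1 > best then 1 else best, some i,
                 if 1 > best then some i else bs) := by
          simp only [pvLoopA, hc, Bool.false_eq_true, ite_false, Option.getD_none, zero_add]
          split <;> rfl
        have hrun := pvLoopA_run rest (i + 1) 1 (if 1 > best then 1 else best) i
            (if 1 > best then some i else bs) (by split <;> omega)
        rw [hstep, hrun, ← hmdef, ← hrdef]
        have eB : max (if 1 > best then 1 else best) (1 + m) = max best (1 + m) := by
          split <;> omega
        have eBS : (if 1 + m > (if 1 > best then 1 else best) then some i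
                      else if 1 > best then some i else bs)
            = (if 1 + m > best then some i else bs) := by
          by_cases h : 1 > best
          · simp only [if_pos h]
            have : 1 + m > best := by omega
            simp only [if_pos this]
            split <;> rfl
          · simp only [if_neg h]
        rw [eB, eBS]
        have hreset := pvLoopA_reset rest' (i + 1 + m) (1 + m) (max best (1 + m)) (some i)
            (if 1 + m > best then some i else bs) (hrdef ▸ pvTakeRun_head rest)
        rw [hreset]
        have hlen' : rest'.length ≤ n := by
          have hrl : rest'.length ≤ rest.length := by rw [hrdef]; exact pvTakeRun_len rest
          simp at hlen
          omega
        rw [ih rest' (i + 1 + m) (max best (1 + m)) (if 1 + m > best then some i else bs)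
            hlen' (by omega)]
        have hruns : pvRuns (c :: rest) i = (i, 1 + m) :: pvRuns rest' (i + 1 + m) := by
          rw [pvRuns]; simp [hc, ← hmdef, ← hrdef]
        rw [hruns]
        have hupd : pvUpd (best, bs) (i, 1 + m)
            = (max best (1 + m), if 1 + m > best then some i else bs) := by
          simp only [pvUpd]
          split <;> simp_all <;> omega
        simp only [List.foldl_cons, hupd]

-- (start,len)-oriented fold of B's max vs A's (best,bestStart)-oriented fold
theorem pvFoldPair : ∀ (rs : List (Int × Int)) (s nlen : Int),
    rs.foldl pvUpd (nlen, some s)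
      = ((rs.foldl (fun b r => if r.2 > b.2 then r else b) (s, nlen)).2,
         some (rs.foldl (fun b r => if r.2 > b.2 then r else b) (s, nlen)).1) := by
  intro rs
  induction rs with
  | nil => intro s nlen; rfl
  | cons r rs ih =>
    intro s nlen
    simp only [List.foldl_cons, pvUpd]
    by_cases h : r.2 > nlen
    · simp only [if_pos h]
      exact ih r.1 r.2
    · simp only [if_neg h]
      exact ih s nlen

-- every run produced by pvRuns has length ≥ 1
theorem pvRuns_pos : ∀ (n : Nat) (l : List (Int × Int × Int)) (i : Int),
    l.length ≤ n → ∀ r ∈ pvRuns l i, 1 ≤ r.2 := by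
  intro n
  induction n with
  | zero =>
    intro l i hlen
    have : l = [] := List.eq_nil_of_length_eq_zero (Nat.le_zero.mp hlen)
    subst this; simp [pvRuns]
  | succ n ih =>
    intro l i hlen r hr
    cases l with
    | nil => simp [pvRuns] at hr
    | cons c rest =>
      by_cases hc : pvIsWhite c = true
      · rw [pvRuns] at hr; simp [hc] at hr
        exact ih rest (i + 1) (by simpa using Nat.le_of_succ_le_succ hlen) r hr
      · rw [pvRuns] at hr
        simp only [if_neg hc, List.mem_cons] at hr
        rcases hr with rfl | h
        · have := pvTakeRun_nonneg rest; simp; omega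
        · have hlen' : (pvTakeRun rest).2.length ≤ n := by
            have := pvTakeRun_len rest; simp at hlen; omega
          exact ih _ _ hlen' r h

-- ===== VERDICT (by name: the statement is the Claim_ definition above) =====
theorem findGreatestContiguousNonWhite_spec : Claim_equal_findGreatestContiguousNonWhite := by
  intro row _
  unfold Spec_findGreatestContiguousNonWhite findGreatestContiguousNonWhite findGreatestContiguousNonWhite_alt
  have hmain := pvMain row.length row 0 0 none (le_refl _) (le_refl 0)
  simp only at hmain ⊢
  rw [hmain]
  have hpos := pvRuns_pos row.length row 0 (le_refl _)
  cases hruns : pvRuns row 0 with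
  | nil => simp [pvMaxRun]
  | cons r rs =>
    have hr1 : 1 ≤ r.2 := hpos r (by rw [hruns]; exact List.mem_cons_self ..)
    have h0 : pvUpd (0, none) r = (r.2, some r.1) := by
      simp only [pvUpd]; rw [if_pos (by omega)]
    simp only [List.foldl_cons, h0, pvMaxRun]
    rw [pvFoldPair rs r.1 r.2]
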